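-- pv_equiv track=rewrite | github.com/imgwho/cwtwb | src/cwtwb/authoring_run.py | _suggest_kpis
-- ===== SOURCE A (Python) =====
-- def _unique_strings(values: list[str]) -> list[str]:
--     seen: set[str] = set()
--     result: list[str] = []
--     for value in values:
--         if value in ("", None):
--             continue
--         cleaned = str(value).strip()
--         if cleaned and cleaned not in seen:
--             seen.add(cleaned)
--             result.append(cleaned)
--     return result
--
-- def _choose_named_field(fields: list[str], preferred_names: list[str]) -> str:
--     normalized_map = {
--         " ".join(field.casefold().replace("_", " ").replace("-", " ").split()): field
--         for field in fields
--     }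
--     for preferred in preferred_names:
--         normalized = " ".join(preferred.casefold().replace("_", " ").replace("-", " ").split())
--         if normalized in normalized_map:
--             return normalized_map[normalized]
--     return ""
--
-- def _suggest_kpis(field_candidates: dict[str, list[str]]) -> list[str]:
--     measures = field_candidates.get("measures", [])
--     kpis: list[str] = []
--     for preferred in ("Sales", "Profit", "Quantity", "Discount"):
--         chosen = _choose_named_field(measures, [preferred])
--         if chosen:
--             kpis.append(chosen)
--     if _choose_named_field(measures, ["Sales"]) and _choose_named_field(measures, ["Profit"]):
--         kpis.append("Profit Ratio")
--     if not kpis and measures: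
--         kpis.extend(measures[:3])
--     return _unique_strings(kpis)
-- ===== SOURCE B (Python) =====
-- def _suggest_kpis(field_candidates: dict[str, list[str]]) -> list[str]:
--     measures = field_candidates.get("measures", [])
--
--     def norm(s: str) -> str:
--         return " ".join(s.casefold().replace("_", " ").replace("-", " ").split())
--
--     targets = [norm(p) for p in ("Sales", "Profit", "Quantity", "Discount")]
--     slots = ["", "", "", ""]
--     # one pass over measures: last matching field wins, like dict overwrite in A
--     for field in measures:
--         n = norm(field)
--         for i, t in enumerate(targets):
--             if n == t:
--                 slots[i] = field
--     kpis = [s for s in slots if s]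
--     if slots[0] and slots[1]:
--         kpis.append("Profit Ratio")
--     if not kpis and measures:
--         kpis.extend(measures[:3])
--     # order-preserving dedup of stripped non-empty values, membership in the output itself
--     out: list[str] = []
--     for v in kpis:
--         c = v.strip()
--         if c and c not in out:
--             out.append(c)
--     return out
-- ===== Notes on version B (the rewrite author's own statement) =====
-- stated objective: alternative
-- what changed: B replaces A's six per-preferred-name calls to a dict-building helper with a single pass over measures filling a fixed 4-slot table of last matches, reuses the Sales/Profit slots for the Profit Ratio test, and dedups by membership in the output list instead of a side 'seen' set.
import Mathlib
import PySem

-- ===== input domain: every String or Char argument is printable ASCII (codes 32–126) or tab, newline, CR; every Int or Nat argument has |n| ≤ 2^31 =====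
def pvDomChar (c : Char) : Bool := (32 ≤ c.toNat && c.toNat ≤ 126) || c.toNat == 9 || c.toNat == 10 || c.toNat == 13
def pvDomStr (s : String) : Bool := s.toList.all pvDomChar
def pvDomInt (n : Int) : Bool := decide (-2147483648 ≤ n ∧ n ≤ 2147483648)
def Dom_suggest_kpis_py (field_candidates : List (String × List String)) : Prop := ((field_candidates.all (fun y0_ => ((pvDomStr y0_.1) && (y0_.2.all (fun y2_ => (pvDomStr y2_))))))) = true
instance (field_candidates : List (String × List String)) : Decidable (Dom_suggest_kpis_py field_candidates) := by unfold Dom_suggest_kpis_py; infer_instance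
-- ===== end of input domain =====

-- B builds the four "slot" values in ONE pass over measures instead of A's six dict-rebuilding
-- helper calls, and dedups against the output list instead of a side set; same return value.

-- ===== PORT A =====
-- " ".join(s.casefold().replace("_"," ").replace("-"," ").split())
-- (casefold ported as PySem.Str.lower: exact on the ASCII domain Dom_ states)
def normKpi (s : String) : String :=
  PySem.Str.join " " (PySem.Str.split₀ (PySem.Str.replace (PySem.Str.replace (PySem.Str.lower s) "_" " ") "-" " "))

-- for preferred in preferred_names: if normalized in normalized_map: return it; return ""
def chooseLoop (m : PySem.Dict String String) : List String → String
  | [] => ""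
  | p :: rest =>
    match m.get? (normKpi p) with
    | some v => v
    | none => chooseLoop m rest

-- _choose_named_field: dict comprehension (later fields overwrite), then scan preferred_names
def choose_named_field (fields : List String) (preferred_names : List String) : String :=
  let normalized_map : PySem.Dict String String :=
    fields.foldl (fun d f => d.insert (normKpi f) f) PySem.Dict.empty
  chooseLoop normalized_map preferred_names

-- _unique_strings: 'value in ("", None)' is value = "" on the typed domain (no None in List String)
def unique_strings_loop (seen : PySem.Set String) (result : List String) : List String → List String
  | [] => result
  | v :: rest =>
    if v = "" then unique_strings_loop seen result rest
    else
      let cleaned := PySem.Str.strip v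
      if cleaned ≠ "" ∧ cleaned ∉ seen then
        unique_strings_loop (seen.add cleaned) (result ++ [cleaned]) rest
      else unique_strings_loop seen result rest

def unique_strings (values : List String) : List String :=
  unique_strings_loop PySem.Set.empty [] values

def suggest_kpis_py (field_candidates : List (String × List String)) : List String :=
  let measures := (PySem.Dict.mk field_candidates).getD "measures" []
  let kpis := ["Sales", "Profit", "Quantity", "Discount"].foldl
    (fun ks p =>
      let chosen := choose_named_field measures [p]
      if chosen ≠ "" then ks ++ [chosen] else ks) []
  let kpis :=
    if choose_named_field measures ["Sales"] ≠ "" ∧ choose_named_field measures ["Profit"] ≠ "" then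
      kpis ++ ["Profit Ratio"]
    else kpis
  let kpis := if kpis = [] ∧ measures ≠ [] then kpis ++ PySem.List.slice measures none (some 3) else kpis
  unique_strings kpis

-- ===== PORT B =====
-- slots[i] = field whenever norm(field) == targets[i]  (inner 'for i, t in enumerate(targets)')
def suggest_kpis_py_alt (field_candidates : List (String × List String)) : List String :=
  let measures := (PySem.Dict.mk field_candidates).getD "measures" []
  let targets := ["Sales", "Profit", "Quantity", "Discount"].map normKpi
  let slots := measures.foldl
    (fun (sl : List String) field =>
      let n := normKpi field
      List.zipWith (fun t s => if n = t then field else s) targets sl)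
    ["", "", "", ""]
  let kpis := slots.filter (· ≠ "")
  let kpis := if slots.getD 0 "" ≠ "" ∧ slots.getD 1 "" ≠ "" then kpis ++ ["Profit Ratio"] else kpis
  let kpis := if kpis = [] ∧ measures ≠ [] then kpis ++ PySem.List.slice measures none (some 3) else kpis
  kpis.foldl (fun out v =>
    let c := PySem.Str.strip v
    if c ≠ "" ∧ c ∉ out then out ++ [c] else out) []

-- ===== PRECONDITION & SPEC =====
def Spec_suggest_kpis_py (field_candidates : List (String × List String)) (out : List String) : Prop := out = suggest_kpis_py_alt field_candidates
instance (field_candidates : List (String × List String)) (out : List String) : Decidable (Spec_suggest_kpis_py field_candidates out) := by unfold Spec_suggest_kpis_py; infer_instance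

-- ===== CLAIM (what is proved, stated in full; the proofs are below) =====
def Claim_equal_suggest_kpis_py : Prop := ∀ (field_candidates : List (String × List String)), Dom_suggest_kpis_py field_candidates → Spec_suggest_kpis_py field_candidates (suggest_kpis_py field_candidates)

-- ===== LEMMAS AND PROOFS =====

-- last-match fold that both sides reduce to (used by the lemmas below)
theorem slots_fold (ms : List String) (a b c d : String) :
    ms.foldl
      (fun (sl : List String) field =>
        let n := normKpi field
        List.zipWith (fun t s => if n = t then field else s)
          [normKpi "Sales", normKpi "Profit", normKpi "Quantity", normKpi "Discount"] sl)
      [a, b, c, d] =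
    [ms.foldl (fun s f => if normKpi f = normKpi "Sales" then f else s) a,
     ms.foldl (fun s f => if normKpi f = normKpi "Profit" then f else s) b,
     ms.foldl (fun s f => if normKpi f = normKpi "Quantity" then f else s) c,
     ms.foldl (fun s f => if normKpi f = normKpi "Discount" then f else s) d] := by
  induction ms generalizing a b c d with
  | nil => rfl
  | cons m rest ih =>
    simp only [List.foldl_cons, List.zipWith]
    exact ih _ _ _ _

def lastMatch (t : String) (ms : List String) : String :=
  ms.foldl (fun s f => if normKpi f = t then f else s) ""

theorem getD_dictFold (ms : List String) (t : String) :
    PySem.Dict.getD (ms.foldl (fun d f => d.insert (normKpi f) f) PySem.Dict.empty) t "" =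
    lastMatch t ms := by
  induction ms using List.reverseRecOn with
  | nil =>
    simp [lastMatch, PySem.Dict.getD_eq_get?_getD, PySem.Dict.get?_empty]
  | append_singleton xs f ih =>
    simp only [lastMatch, List.foldl_append, List.foldl_cons, List.foldl_nil] at *
    rw [PySem.Dict.getD_insert]
    by_cases h : normKpi f = t
    · simp [h]
    · simp [h, Ne.symm h, ih]

theorem choose_single (ms : List String) (p : String) :
    choose_named_field ms [p] =
    PySem.Dict.getD (ms.foldl (fun d f => d.insert (normKpi f) f) PySem.Dict.empty) (normKpi p) "" := by
  unfold choose_named_field chooseLoop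
  rw [PySem.Dict.getD_eq_get?_getD]
  cases h : (ms.foldl (fun d f => d.insert (normKpi f) f) PySem.Dict.empty).get? (normKpi p) <;>
    simp [h, chooseLoop]

theorem slots_eq (ms : List String) :
    ms.foldl
      (fun (sl : List String) field =>
        let n := normKpi field
        List.zipWith (fun t s => if n = t then field else s)
          (["Sales", "Profit", "Quantity", "Discount"].map normKpi) sl)
      ["", "", "", ""] =
    [lastMatch (normKpi "Sales") ms, lastMatch (normKpi "Profit") ms,
     lastMatch (normKpi "Quantity") ms, lastMatch (normKpi "Discount") ms] := by
  simp only [List.map_cons, List.map_nil, lastMatch]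
  exact slots_fold ms "" "" "" ""

theorem unique_loop_eq (values : List String) (seen : PySem.Set String) (out : List String)
    (h : ∀ x, x ∈ seen ↔ x ∈ out) :
    unique_strings_loop seen out values =
    values.foldl (fun out v =>
      let c := PySem.Str.strip v
      if c ≠ "" ∧ c ∉ out then out ++ [c] else out) out := by
  induction values generalizing seen out with
  | nil => rfl
  | cons v rest ih =>
    simp only [unique_strings_loop, List.foldl_cons]
    by_cases hv : v = ""
    · subst hv
      simp only [if_true, show PySem.Str.strip "" = "" from rfl, ne_eq, not_true_eq_false,
        false_and, if_false]
      exact ih seen out h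
    · simp only [hv, if_false]
      by_cases hc : PySem.Str.strip v ≠ "" ∧ PySem.Str.strip v ∉ seen
      · have hc' : PySem.Str.strip v ≠ "" ∧ PySem.Str.strip v ∉ out :=
          ⟨hc.1, fun hm => hc.2 ((h _).2 hm)⟩
        rw [if_pos hc, if_pos hc']
        refine ih _ _ (fun x => ?_)
        rw [PySem.Set.mem_add, List.mem_append, h x]
        simp
      · have hc' : ¬ (PySem.Str.strip v ≠ "" ∧ PySem.Str.strip v ∉ out) := by
          intro hx; exact hc ⟨hx.1, fun hm => hx.2 ((h _).1 hm)⟩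
        rw [if_neg hc, if_neg hc']
        exact ih seen out h

theorem unique_eq (values : List String) :
    unique_strings values =
    values.foldl (fun out v =>
      let c := PySem.Str.strip v
      if c ≠ "" ∧ c ∉ out then out ++ [c] else out) [] := by
  exact unique_loop_eq values PySem.Set.empty [] (by simp [PySem.Set.empty])

-- ===== VERDICT (by name: the statement is the Claim_ definition above) =====
theorem suggest_kpis_py_spec : Claim_equal_suggest_kpis_py := by
  intro fc _hd
  show suggest_kpis_py fc = suggest_kpis_py_alt fc
  unfold suggest_kpis_py suggest_kpis_py_alt
  simp only [slots_eq, choose_single, getD_dictFold, unique_eq, List.foldl_cons, List.foldl_nil]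
  generalize ({ items := fc } : PySem.Dict String (List String)).getD "measures" [] = ms
  by_cases h0 : lastMatch (normKpi "Sales") ms = "" <;>
  by_cases h1 : lastMatch (normKpi "Profit") ms = "" <;>
  by_cases h2 : lastMatch (normKpi "Quantity") ms = "" <;>
  by_cases h3 : lastMatch (normKpi "Discount") ms = "" <;>
    simp [h0, h1, h2, h3, List.filter, List.getD]
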